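-- pv_equiv track=rewrite | github.com/Rajinikanth-Kakarla/Python | large_seclarge.py | large_sec_large
-- ===== SOURCE A (Python) =====
-- def large_sec_large(arr):
--     if len(arr)<2:
--         return 0
--     else:
--         max = float('-inf')   #max = -inf
--         sec = float('-inf')   #sec = -inf
--         for i in arr:         #5         2    3   -1   6       8
--             if i > max:       #5>-inf    2>5  3>5 -1>5 6>5     8>6
--                 sec = max     #sec = -inf              sec = 5 sec = 6
--                 max = i       #max = 5                 max = 6 max = 8
--             elif i > sec and i!=max:#     2>-inf
--                 sec = i             #      sec=2  3 -1
--         if sec!=float('-inf'):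
--             return max, sec
-- ===== SOURCE B (Python) =====
-- def large_sec_large(arr):
--     if len(arr) < 2:
--         return 0
--     vals = sorted(set(arr))  # distinct values, ascending
--     if len(vals) >= 2:
--         return vals[-1], vals[-2]
-- ===== Notes on version B (the rewrite author's own statement) =====
-- stated objective: simpler
-- what changed: Replaces the stateful single-pass max/sec scan with -inf sentinels by sorting the distinct values and reading the last two; the all-equal case falls out as len(vals)<2 instead of a sentinel comparison.
-- outside the precondition, e.g. on large_sec_large([5]): A returns 0, B returns 0
import Mathlib
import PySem

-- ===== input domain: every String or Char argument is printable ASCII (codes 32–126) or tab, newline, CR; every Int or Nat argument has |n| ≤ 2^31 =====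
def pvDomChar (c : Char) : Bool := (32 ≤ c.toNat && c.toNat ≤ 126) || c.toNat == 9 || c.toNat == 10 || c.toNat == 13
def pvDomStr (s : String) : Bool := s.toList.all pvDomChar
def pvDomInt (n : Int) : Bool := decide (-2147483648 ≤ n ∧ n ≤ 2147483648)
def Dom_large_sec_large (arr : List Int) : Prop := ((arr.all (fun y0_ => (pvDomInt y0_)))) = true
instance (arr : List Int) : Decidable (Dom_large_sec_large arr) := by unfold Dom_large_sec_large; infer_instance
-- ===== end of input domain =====

-- B replaces A's stateful max/sec scan with sorted(set(arr)) and reading the last two distinct values (objective: simpler).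


-- ===== PORT A =====
-- float('-inf') is modelled by `none` (Option Int): arr holds only ints, every int is > -inf,
-- `i != max` is true whenever max is -inf, and sec stays -inf exactly while never assigned —
-- so the Option encoding is exact on the int-list domain.
def pvGt (i : Int) (o : Option Int) : Bool :=
  match o with
  | none => true          -- i > -inf
  | some m => decide (m < i)

def pvStep (ms : Option Int × Option Int) (i : Int) : Option Int × Option Int :=
  if pvGt i ms.1 then (some i, ms.1)
  else if pvGt i ms.2 && !(some i == ms.1) then (ms.1, some i)
  else ms

def large_sec_large (arr : List Int) : Option (Int × Int) :=
  if arr.length < 2 then none   -- Python returns the int 0 here, not a value of the Option type; excluded by Pre_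
  else
    let st := arr.foldl pvStep (none, none)
    if st.2 ≠ none then
      match st.1, st.2 with
      | some m, some s => some (m, s)
      | _, _ => none
    else none                   -- implicit None

-- ===== PORT B =====
def large_sec_large_alt (arr : List Int) : Option (Int × Int) :=
  if arr.length < 2 then none   -- Python returns the int 0 here, not a value of the Option type; excluded by Pre_
  else
    let vals := PySem.List.sorted (PySem.Set.ofList arr) (fun x => x) false
    if 2 ≤ vals.length then
      match PySem.List.pyGet? vals (-1) with
      | none => none
      | some a =>
        match PySem.List.pyGet? vals (-2) with
        | none => none
        | some b => some (a, b)
    else none                   -- implicit None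

-- ===== PRECONDITION & SPEC =====
-- Pre_ excludes lists of length < 2, on which A returns the int 0 — not a value of the
-- declared Optional[tuple] return type.
def Pre_large_sec_large (arr : List Int) : Prop := 2 ≤ arr.length
instance (arr : List Int) : Decidable (Pre_large_sec_large arr) := by unfold Pre_large_sec_large; infer_instance
def pvWitness_large_sec_large : List Int := [1, 2]
def Spec_large_sec_large (arr : List Int) (out : Option (Int × Int)) : Prop := out = large_sec_large_alt arr
instance (arr : List Int) (out : Option (Int × Int)) : Decidable (Spec_large_sec_large arr out) := by unfold Spec_large_sec_large; infer_instance

-- ===== CLAIM (what is proved, stated in full; the proofs are below) =====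
def Claim_equal_large_sec_large : Prop := ∀ (arr : List Int), Dom_large_sec_large arr → Pre_large_sec_large arr → Spec_large_sec_large arr (large_sec_large arr)

-- ===== LEMMAS AND PROOFS =====

-- second-largest-distinct spec: max of the elements strictly below the max
def pvSec (l : List Int) : Option Int :=
  match l.max? with
  | none => none
  | some M => (l.filter (fun x => decide (x < M))).max?

lemma max?_concat_int (l : List Int) (i : Int) :
    (l ++ [i]).max? = some (match l.max? with | none => i | some m => max m i) := by
  cases h : l.max? with
  | none => simp [List.max?_eq_none_iff.mp h]
  | some m =>
    obtain ⟨hm, hle⟩ := List.max?_eq_some_iff.mp h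
    rw [List.max?_eq_some_iff]
    constructor
    · rcases le_total m i with hmi | him
      · simp [max_eq_right hmi]
      · simp [max_eq_left him, hm]
    · intro b hb
      rcases List.mem_append.mp hb with hb | hb
      · exact le_trans (hle b hb) (le_max_left m i)
      · simp at hb; simp [hb]

lemma pvSec_some (l : List Int) (M : Int) (h : l.max? = some M) :
    pvSec l = (l.filter (fun x => decide (x < M))).max? := by
  unfold pvSec; rw [h]

lemma pvStep_concat (seen : List Int) (i : Int) :
    pvStep (seen.max?, pvSec seen) i = ((seen ++ [i]).max?, pvSec (seen ++ [i])) := by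
  cases h : seen.max? with
  | none =>
    have hs : seen = [] := List.max?_eq_none_iff.mp h
    subst hs
    simp [pvStep, pvGt, pvSec]
  | some M =>
    obtain ⟨hM, hle⟩ := List.max?_eq_some_iff.mp h
    rcases lt_trichotomy M i with hMi | hMi | hMi
    · -- new maximum
      have hmax : (seen ++ [i]).max? = some i := by
        rw [max?_concat_int, h]; simp [max_eq_right hMi.le]
      have hfilter : (seen ++ [i]).filter (fun x => decide (x < i)) = seen := by
        rw [List.filter_append]
        have h1 : seen.filter (fun x => decide (x < i)) = seen :=
          List.filter_eq_self.mpr (fun x hx => by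
            simp only [decide_eq_true_eq]; exact lt_of_le_of_lt (hle x hx) hMi)
        simp [h1]
      have hsec : pvSec (seen ++ [i]) = some M := by
        rw [pvSec_some _ i hmax, hfilter, h]
      simp [pvStep, pvGt, hMi, hmax, hsec]
    · -- equal to the maximum
      subst hMi
      have hmax : (seen ++ [M]).max? = some M := by
        rw [max?_concat_int, h]; simp
      have hsec : pvSec (seen ++ [M]) = pvSec seen := by
        rw [pvSec_some _ M hmax, pvSec_some _ M h, List.filter_append]
        simp
      simp [pvStep, pvGt, hmax, hsec]
    · -- below the maximum
      have hmax : (seen ++ [i]).max? = some M := by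
        rw [max?_concat_int, h]; simp [max_eq_left hMi.le]
      have hfil : (seen ++ [i]).filter (fun x => decide (x < M))
          = seen.filter (fun x => decide (x < M)) ++ [i] := by
        rw [List.filter_append]; simp [hMi]
      have hsec : pvSec (seen ++ [i])
          = some (match pvSec seen with | none => i | some s => max s i) := by
        rw [pvSec_some _ M hmax, pvSec_some _ M h, hfil, max?_concat_int]
      have hiM : i ≠ M := ne_of_lt hMi
      cases hs : pvSec seen with
      | none => simp [pvStep, pvGt, hmax, hsec, hs, hiM, not_lt.mpr hMi.le]
      | some sv =>
        by_cases hsi : sv < i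
        · simp [pvStep, pvGt, hmax, hsec, hs, hiM, not_lt.mpr hMi.le, hsi, max_eq_right hsi.le]
        · simp [pvStep, pvGt, hmax, hsec, hs, not_lt.mpr hMi.le, hsi, max_eq_left (not_lt.mp hsi)]

lemma foldl_pvStep (l : List Int) : ∀ seen : List Int,
    l.foldl pvStep (seen.max?, pvSec seen) = ((seen ++ l).max?, pvSec (seen ++ l)) := by
  induction l with
  | nil => intro seen; simp
  | cons i t ih =>
    intro seen
    have := ih (seen ++ [i])
    simpa [List.foldl_cons, pvStep_concat] using this

lemma foldl_pvStep_nil (arr : List Int) :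
    arr.foldl pvStep (none, none) = (arr.max?, pvSec arr) := by
  have := foldl_pvStep arr []
  simpa [pvSec] using this

-- B-side: properties of vals = sorted(set(arr))
lemma max?_congr_mem (l l' : List Int) (h : ∀ x, x ∈ l ↔ x ∈ l') : l.max? = l'.max? := by
  cases h' : l'.max? with
  | none =>
    have : l' = [] := List.max?_eq_none_iff.mp h'
    subst this
    rw [List.max?_eq_none_iff]
    cases l with
    | nil => rfl
    | cons a t => exact absurd ((h a).mp (by simp)) (by simp)
  | some m =>
    obtain ⟨hm, hle⟩ := List.max?_eq_some_iff.mp h'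
    rw [List.max?_eq_some_iff]
    exact ⟨(h m).mpr hm, fun b hb => hle b ((h b).mp hb)⟩

lemma max?_pairwise_lt (l : List Int) (hp : l.Pairwise (· < ·)) (hne : l ≠ []) :
    l.max? = some (l.getLast hne) := by
  rw [List.max?_eq_some_iff]
  refine ⟨List.getLast_mem hne, ?_⟩
  intro b hb
  have h' := List.dropLast_append_getLast hne
  rw [← h'] at hp hb
  rcases List.mem_append.mp hb with h1 | h1
  · exact le_of_lt ((List.pairwise_append.mp hp).2.2 b h1 _ (by simp))
  · simp only [List.mem_singleton] at h1
    simp [h1]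

-- ===== VERDICT (by name: the statement is the Claim_ definition above) =====
theorem large_sec_large_spec : Claim_equal_large_sec_large := by
  intro arr _ hpre
  unfold Pre_large_sec_large at hpre
  unfold Spec_large_sec_large large_sec_large large_sec_large_alt
  have hlen : ¬ arr.length < 2 := by omega
  simp only [if_neg hlen, foldl_pvStep_nil]
  set vals := PySem.List.sorted (PySem.Set.ofList arr) (fun x => x) false with hv
  have hmem : ∀ x, x ∈ vals ↔ x ∈ arr := fun x => by
    rw [hv, PySem.List.mem_sorted, PySem.Set.mem_ofList]
  have hpw : vals.Pairwise (· < ·) := PySem.List.sorted_ofList_pairwise_lt arr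
  have hne_arr : arr ≠ [] := by intro h; subst h; simp at hpre
  have hne : vals ≠ [] := by
    intro h
    cases arr with
    | nil => exact hne_arr rfl
    | cons a t =>
      have : a ∈ vals := (hmem a).mpr (by simp)
      rw [h] at this; simp at this
  have hmax : arr.max? = vals.max? := max?_congr_mem _ _ (fun x => (hmem x).symm)
  have hmaxv : vals.max? = some (vals.getLast hne) := max?_pairwise_lt vals hpw hne
  set M := vals.getLast hne with hM
  have hdec := List.dropLast_append_getLast hne
  have hlt : ∀ x ∈ vals.dropLast, x < M := by
    intro x hx
    have hp' := hpw
    rw [← hdec] at hp'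
    exact (List.pairwise_append.mp hp').2.2 x hx _ (by simp [hM])
  have hsec : pvSec arr = vals.dropLast.max? := by
    rw [pvSec_some arr M (by rw [hmax, hmaxv])]
    have hfe : ∀ x, x ∈ arr.filter (fun x => decide (x < M)) ↔
        x ∈ vals.filter (fun x => decide (x < M)) := by
      intro x; simp only [List.mem_filter]
      exact and_congr_left (fun _ => (hmem x).symm)
    rw [max?_congr_mem _ _ hfe]
    congr 1
    rw [← hdec, List.filter_append, List.dropLast_concat]
    have h1 : vals.dropLast.filter (fun x => decide (x < M)) = vals.dropLast :=
      List.filter_eq_self.mpr (fun x hx => by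
        simp only [decide_eq_true_eq]; exact hlt x hx)
    simp only [List.filter_cons, List.filter_nil, decide_eq_true_eq, h1]
    rw [if_neg (by rw [hM]; exact lt_irrefl _)]
    simp
  rcases Nat.lt_or_ge vals.length 2 with hk | hk
  · -- a single distinct value: both sides are none
    have hk1 : vals.length = 1 := by
      cases hv1 : vals with
      | nil => exact absurd hv1 hne
      | cons a t => rw [hv1] at hk; simp at hk ⊢; omega
    have hdl : vals.dropLast = [] := by
      have hld : vals.dropLast.length = vals.length - 1 := List.length_dropLast
      rw [hk1] at hld
      exact List.eq_nil_of_length_eq_zero (by omega)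
    rw [hsec, hdl]
    simp [hk1]
  · -- two or more distinct values
    have hdlne : vals.dropLast ≠ [] := by
      intro h
      have hld : vals.dropLast.length = vals.length - 1 := List.length_dropLast
      rw [h] at hld; simp at hld; omega
    have hpwd : vals.dropLast.Pairwise (· < ·) :=
      hpw.sublist (List.dropLast_sublist vals)
    have hsec2 : pvSec arr = some (vals.dropLast.getLast hdlne) := by
      rw [hsec]; exact max?_pairwise_lt _ hpwd hdlne
    have hget1 : PySem.List.pyGet? vals (-1) = some M := by
      rw [PySem.List.pyGet?_neg_one, List.getLast?_eq_some_getLast hne]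
    have hget2 : PySem.List.pyGet? vals (-2) = some (vals.dropLast.getLast hdlne) := by
      rw [PySem.List.pyGet?_neg_ofNat vals 2 (by omega) hk]
      have hgl : some (vals.dropLast.getLast hdlne) = vals.dropLast.getLast? :=
        (List.getLast?_eq_some_getLast hdlne).symm
      rw [hgl, List.getLast?_eq_getElem?, List.getElem?_dropLast, List.length_dropLast]
      rw [if_pos (by omega)]
      congr 1
    rw [hmax, hmaxv, hsec2]
    simp [hk, hget1, hget2]
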